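-- pv_equiv track=rewrite | github.com/sunnyfloyd/stxnext_boks_rest_api | stxnext_project/books/utils.py | parse_incomplete_date
-- ===== SOURCE A (Python) =====
-- def parse_incomplete_date(date_raw):
--     """
--     Parse incomplete date (missing month or day) so it is accepted by a DateField.
--     """
--     input_date = date_raw.split("-")
--     date = []
--     for i in range(3):
--         try:
--             date.append(input_date[i])
--         except IndexError:
--             date.append("01")
--     return "-".join(date)
-- ===== SOURCE B (Python) =====
-- def parse_incomplete_date(date_raw):
--     """
--     Parse incomplete date (missing month or day) so it is accepted by a DateField.
--     """
--     out = []
--     dashes = 0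
--     for ch in date_raw:
--         if ch == "-":
--             if dashes == 2:
--                 break
--             dashes += 1
--         out.append(ch)
--     out.append("-01" * (2 - dashes))
--     return "".join(out)
-- ===== Notes on version B (the rewrite author's own statement) =====
-- stated objective: alternative
-- what changed: Replaces A's split-into-fields, try/except padding loop and join by a single left-to-right character scan that copies characters while counting dashes, stops at the third dash, and appends one default dash-01 group per missing separator.
import Mathlib
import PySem

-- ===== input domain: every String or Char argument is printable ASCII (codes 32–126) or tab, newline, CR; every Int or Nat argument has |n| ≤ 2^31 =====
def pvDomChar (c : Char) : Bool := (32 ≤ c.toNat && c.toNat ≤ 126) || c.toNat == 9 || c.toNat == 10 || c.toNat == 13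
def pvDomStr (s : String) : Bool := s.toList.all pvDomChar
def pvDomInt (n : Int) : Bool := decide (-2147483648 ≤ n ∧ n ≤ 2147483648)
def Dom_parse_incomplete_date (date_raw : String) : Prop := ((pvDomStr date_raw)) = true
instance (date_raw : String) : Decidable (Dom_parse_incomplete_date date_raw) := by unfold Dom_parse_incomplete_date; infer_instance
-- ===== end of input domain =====

-- ===== PORT A =====
-- B replaces A's split/pad-loop/join by a single character scan with a dash counter (objective: simpler).
def parse_incomplete_date (date_raw : String) : String :=
  let input_date := PySem.Chars.splitOn date_raw.toList ['-']
  let date :=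
    (PySem.List.pyRange 0 3 1).foldl (fun date i =>
      match PySem.List.pyGet? input_date i with
      | some x => date ++ [x]           -- date.append(input_date[i])
      | none => date ++ ["01".toList]) []     -- except IndexError: date.append("01")
  String.ofList (PySem.Chars.join ['-'] date)

-- ===== PORT B =====
-- one left-to-right scan over the characters: copy chars, count dashes, stop at the
-- third dash, then append one default group per missing separator
def pvScanB : List Char → Nat → List Char
  | [], d => (List.replicate (2 - d) "-01".toList).flatten
  | c :: t, d =>
    if c = '-' then
      if d = 2 then []                  -- break on the third dash
      else c :: pvScanB t (d + 1)
    else c :: pvScanB t d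

def parse_incomplete_date_alt (date_raw : String) : String :=
  String.ofList (pvScanB date_raw.toList 0)

-- ===== PRECONDITION & SPEC =====
def Spec_parse_incomplete_date (date_raw : String) (out : String) : Prop := out = parse_incomplete_date_alt date_raw
instance (date_raw : String) (out : String) : Decidable (Spec_parse_incomplete_date date_raw out) := by unfold Spec_parse_incomplete_date; infer_instance

-- ===== CLAIM (what is proved, stated in full; the proofs are below) =====
def Claim_equal_parse_incomplete_date : Prop := ∀ (date_raw : String), Dom_parse_incomplete_date date_raw → Spec_parse_incomplete_date date_raw (parse_incomplete_date date_raw)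

-- ===== LEMMAS AND PROOFS =====

-- A's padding loop is "append defaults, keep the first three fields"
theorem pad3_eq (l : List (List Char)) :
    (PySem.List.pyRange 0 3 1).foldl (fun date i =>
      match PySem.List.pyGet? l i with
      | some x => date ++ [x]
      | none => date ++ ["01".toList]) [] = (l ++ ["01".toList, "01".toList, "01".toList]).take 3 := by
  rcases l with _ | ⟨a, _ | ⟨b, _ | ⟨c, t⟩⟩⟩ <;>
    simp [PySem.List.pyRange, PySem.List.pyGet?, PySem.List.pyIdx?, List.range_succ] <;>
    split_ifs <;> simp_all <;> omega

-- a simple structural recursion computing (first field, remaining fields) of split on '-'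
def pvSplit : List Char → List Char × List (List Char)
  | [] => ([], [])
  | c :: t =>
    let (p, ps) := pvSplit t
    if c = '-' then ([], p :: ps) else (c :: p, ps)

theorem go_spec (l : List Char) : ∀ (fuel : Nat), l.length < fuel → ∀ (cur : List Char) (acc : List (List Char)),
    PySem.Chars.splitOn.go ['-'] fuel l cur acc
      = acc.reverse ++ (cur.reverse ++ (pvSplit l).1) :: (pvSplit l).2 := by
  induction l with
  | nil =>
    intro fuel h cur acc
    cases fuel with
    | zero => omega
    | succ f => simp [PySem.Chars.splitOn.go, pvSplit]
  | cons c t ih =>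
    intro fuel h cur acc
    cases fuel with
    | zero => simp at h
    | succ f =>
      rw [PySem.Chars.splitOn.go]
      by_cases hc : c = '-'
      · subst hc
        rw [if_pos (by simp [List.isPrefixOf])]
        rw [show List.drop ['-'].length ('-' :: t) = t from rfl]
        rw [ih f (by simpa using h)]
        have e1 : (pvSplit ('-' :: t)).1 = [] := by simp [pvSplit]
        have e2 : (pvSplit ('-' :: t)).2 = (pvSplit t).1 :: (pvSplit t).2 := by simp [pvSplit]
        rw [e1, e2]
        simp only [List.reverse_cons, List.append_assoc, List.nil_append, List.append_nil,
          List.reverse_nil, List.cons_append]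
      · rw [if_neg (by simp [List.isPrefixOf]; exact Ne.symm hc)]
        rw [ih f (by simpa using h)]
        have e1 : (pvSplit (c :: t)).1 = c :: (pvSplit t).1 := by simp [pvSplit, hc]
        have e2 : (pvSplit (c :: t)).2 = (pvSplit t).2 := by simp [pvSplit, hc]
        rw [e1, e2]
        simp only [List.reverse_cons, List.append_assoc, List.cons_append, List.nil_append]

theorem splitOn_eq (l : List Char) :
    PySem.Chars.splitOn l ['-'] = (pvSplit l).1 :: (pvSplit l).2 := by
  unfold PySem.Chars.splitOn
  rw [go_spec l (l.length + 1) (by omega)]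
  simp

theorem intercalate_cons (sep x : List Char) (r : List (List Char)) :
    List.intercalate sep (x :: r) = x ++ (if r = [] then [] else sep ++ List.intercalate sep r) := by
  cases r <;> simp [List.intercalate, List.intersperse]

theorem inter_nil_cons (r : List (List Char)) (h : r ≠ []) :
    List.intercalate ['-'] ([] :: r) = '-' :: List.intercalate ['-'] r := by
  rw [intercalate_cons, if_neg h]; rfl

theorem inter_cons_head (c : Char) (p : List Char) (r : List (List Char)) :
    List.intercalate ['-'] ((c :: p) :: r) = c :: List.intercalate ['-'] (p :: r) := by
  rw [intercalate_cons, intercalate_cons]; simp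

theorem scan_eq (cs : List Char) : ∀ d, d ≤ 2 →
    pvScanB cs d = List.intercalate ['-']
      ((((pvSplit cs).1 :: (pvSplit cs).2) ++ ["01".toList, "01".toList, "01".toList]).take (3 - d)) := by
  induction cs with
  | nil =>
    intro d hd
    interval_cases d <;> decide
  | cons c t ih =>
    intro d hd
    by_cases hc : c = '-'
    · subst hc
      by_cases h2 : d = 2
      · subst h2
        rw [show pvScanB ('-' :: t) 2 = [] from by simp [pvScanB]]
        rw [show (pvSplit ('-' :: t)).1 = [] from by simp [pvSplit]]
        simp [intercalate_cons]
      · have hd1 : d + 1 ≤ 2 := by omega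
        rw [show pvScanB ('-' :: t) d = '-' :: pvScanB t (d + 1) from by simp [pvScanB, h2]]
        rw [show (pvSplit ('-' :: t)).1 = [] from by simp [pvSplit],
            show (pvSplit ('-' :: t)).2 = (pvSplit t).1 :: (pvSplit t).2 from by simp [pvSplit]]
        rw [ih (d + 1) hd1]
        obtain ⟨m, hm⟩ : ∃ m, 3 - (d + 1) = m + 1 := ⟨1 - d, by omega⟩
        rw [show 3 - d = (3 - (d + 1)) + 1 from by omega, hm]
        simp only [List.cons_append, List.take_succ_cons]
        rw [inter_nil_cons _ (by simp)]
    · rw [show pvScanB (c :: t) d = c :: pvScanB t d from by simp [pvScanB, hc]]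
      rw [show (pvSplit (c :: t)).1 = c :: (pvSplit t).1 from by simp [pvSplit, hc],
          show (pvSplit (c :: t)).2 = (pvSplit t).2 from by simp [pvSplit, hc]]
      rw [ih d hd]
      obtain ⟨m, hm⟩ : ∃ m, 3 - d = m + 1 := ⟨2 - d, by omega⟩
      rw [hm]
      simp only [List.cons_append, List.take_succ_cons]
      rw [inter_cons_head]

-- ===== VERDICT (by name: the statement is the Claim_ definition above) =====
theorem parse_incomplete_date_spec : Claim_equal_parse_incomplete_date := by
  intro date_raw _
  unfold Spec_parse_incomplete_date parse_incomplete_date parse_incomplete_date_alt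
  simp only [pad3_eq, splitOn_eq, PySem.Chars.join]
  rw [scan_eq date_raw.toList 0 (by omega)]
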